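-- pv_equiv track=rewrite | github.com/danirodao/clinical-trail-agentic-platform | processor/pdf_parser.py | _find_pages_for_range
-- ===== SOURCE A (Python) =====
-- def _find_pages_for_range(
--     start: int, end: int, page_texts: dict
-- ) -> list[int]:
--     """Determine which pages a text range spans."""
--     pages = []
--     cumulative = 0
--     for page_num in sorted(page_texts.keys()):
--         page_len = len(page_texts[page_num]) + 20  # separator overhead
--         if cumulative + page_len >= start and cumulative <= end:
--             pages.append(page_num)
--         cumulative += page_len
--     return pages
-- ===== SOURCE B (Python) =====
-- import bisect
--
--
-- def _find_pages_for_range(start, end, page_texts):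
--     """Determine which pages a text range spans.
--
--     Different strategy: build a cumulative offset table for the sorted pages,
--     then locate the boundary pages by binary search; since the offsets are
--     strictly increasing, the spanned pages form a contiguous slice of the
--     sorted key list.
--     """
--     keys = sorted(page_texts.keys())
--     ends = []  # ends[i] = cumulative offset after page keys[i]
--     total = 0
--     for k in keys:
--         total += len(page_texts[k]) + 20  # separator overhead
--         ends.append(total)
--     starts = [0] + ends[:-1]  # starts[i] = cumulative offset before page keys[i]
--     lo = bisect.bisect_left(ends, start)   # first page whose end offset >= start
--     hi = bisect.bisect_right(starts, end)  # pages whose start offset <= end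
--     return keys[lo:hi]
-- ===== Notes on version B (the rewrite author's own statement) =====
-- stated objective: alternative
-- what changed: Instead of testing every page with an overlap condition while accumulating the offset, B builds the cumulative start/end offset tables of the sorted pages and binary-searches (bisect) the two boundaries, returning the contiguous slice of sorted keys the range spans.
import Mathlib
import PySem

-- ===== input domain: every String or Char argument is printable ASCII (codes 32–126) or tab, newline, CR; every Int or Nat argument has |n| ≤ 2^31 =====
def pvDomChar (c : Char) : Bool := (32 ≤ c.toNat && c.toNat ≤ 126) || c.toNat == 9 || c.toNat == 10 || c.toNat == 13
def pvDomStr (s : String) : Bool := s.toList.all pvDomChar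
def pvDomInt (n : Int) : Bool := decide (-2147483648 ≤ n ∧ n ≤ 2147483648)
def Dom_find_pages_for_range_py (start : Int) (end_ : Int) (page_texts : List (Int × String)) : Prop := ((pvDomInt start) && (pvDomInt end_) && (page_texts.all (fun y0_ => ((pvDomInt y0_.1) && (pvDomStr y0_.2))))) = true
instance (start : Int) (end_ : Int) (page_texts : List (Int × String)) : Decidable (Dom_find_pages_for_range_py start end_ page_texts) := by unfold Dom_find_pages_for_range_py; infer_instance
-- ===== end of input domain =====

-- B replaces A's per-page overlap test by a prefix-offset table plus two binary searches
-- (the spanned pages are a contiguous slice of the sorted keys); objective: alternative, not faster.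

-- ===== PORT A =====
-- page_texts[page_num] is ported with getD "": page_num always comes from the dict's own keys,
-- so the default is never used and the lookup is exact.
def find_pages_for_range_py (start : Int) (end_ : Int) (page_texts : List (Int × String)) : List Int :=
  let d := PySem.Dict.ofList page_texts
  let st := (PySem.List.sorted d.keys (fun k => k) false).foldl
    (fun (st : List Int × Int) page_num =>
      let page_len : Int := PySem.Str.len (d.getD page_num "") + 20
      ((if st.2 + page_len ≥ start ∧ st.2 ≤ end_ then st.1 ++ [page_num] else st.1),
       st.2 + page_len)) ([], 0)
  st.1

-- ===== PORT B =====
def find_pages_for_range_py_alt (start : Int) (end_ : Int) (page_texts : List (Int × String)) : List Int :=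
  let d := PySem.Dict.ofList page_texts
  let keys := PySem.List.sorted d.keys (fun k => k) false
  let acc := keys.foldl
    (fun (acc : List Int × Int) k =>
      let total := acc.2 + PySem.Str.len (d.getD k "") + 20
      (acc.1 ++ [total], total)) ([], 0)
  let ends := acc.1
  let starts := 0 :: PySem.List.slice ends none (some (-1))
  let lo := PySem.List.bisectLeft ends start
  let hi := PySem.List.bisectRight starts end_
  PySem.List.slice keys (some (lo : Int)) (some (hi : Int))

-- ===== PRECONDITION & SPEC =====
def Spec_find_pages_for_range_py (start : Int) (end_ : Int) (page_texts : List (Int × String)) (out : List Int) : Prop := out = find_pages_for_range_py_alt start end_ page_texts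
instance (start : Int) (end_ : Int) (page_texts : List (Int × String)) (out : List Int) : Decidable (Spec_find_pages_for_range_py start end_ page_texts out) := by unfold Spec_find_pages_for_range_py; infer_instance

-- ===== CLAIM (what is proved, stated in full; the proofs are below) =====
def Claim_equal_find_pages_for_range_py : Prop := ∀ (start : Int) (end_ : Int) (page_texts : List (Int × String)), Dom_find_pages_for_range_py start end_ page_texts → Spec_find_pages_for_range_py start end_ page_texts (find_pages_for_range_py start end_ page_texts)

-- ===== LEMMAS AND PROOFS =====

-- Reference recursion for A's loop: emit the pages whose overlap test succeeds,
-- threading the cumulative offset c.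
def goA (start end_ : Int) (f : Int → Int) (c : Int) : List Int → List Int
  | [] => []
  | k :: t => (if c + f k ≥ start ∧ c ≤ end_ then [k] else []) ++ goA start end_ f (c + f k) t

-- endsFrom f c ks : cumulative END offsets of the pages ks starting at offset c.
def endsFrom (f : Int → Int) (c : Int) : List Int → List Int
  | [] => []
  | k :: t => (c + f k) :: endsFrom f (c + f k) t

-- startsFrom f c ks : cumulative START offsets.
def startsFrom (f : Int → Int) (c : Int) : List Int → List Int
  | [] => []
  | k :: t => c :: startsFrom f (c + f k) t

-- cumEnd f c ks : offset after the last page.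
def cumEnd (f : Int → Int) (c : Int) : List Int → Int
  | [] => c
  | k :: t => cumEnd f (c + f k) t

lemma mem_endsFrom_gt (f : Int → Int) (hf : ∀ k, 0 < f k) :
    ∀ (ks : List Int) (c x : Int), x ∈ endsFrom f c ks → c < x := by
  intro ks
  induction ks with
  | nil => intro c x hx; simp [endsFrom] at hx
  | cons k t ih =>
    intro c x hx
    simp only [endsFrom, List.mem_cons] at hx
    rcases hx with rfl | hx
    · have := hf k; omega
    · have := ih (c + f k) x hx
      have := hf k; omega

lemma mem_startsFrom_ge (f : Int → Int) (hf : ∀ k, 0 < f k) :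
    ∀ (ks : List Int) (c x : Int), x ∈ startsFrom f c ks → c ≤ x := by
  intro ks
  induction ks with
  | nil => intro c x hx; simp [startsFrom] at hx
  | cons k t ih =>
    intro c x hx
    simp only [startsFrom, List.mem_cons] at hx
    rcases hx with rfl | hx
    · omega
    · have := ih (c + f k) x hx
      have := hf k; omega

lemma endsFrom_pairwise (f : Int → Int) (hf : ∀ k, 0 < f k) :
    ∀ (ks : List Int) (c : Int), (endsFrom f c ks).Pairwise (· ≤ ·) := by
  intro ks
  induction ks with
  | nil => intro c; simp [endsFrom]
  | cons k t ih =>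
    intro c
    simp only [endsFrom, List.pairwise_cons]
    exact ⟨fun x hx => le_of_lt (mem_endsFrom_gt f hf t (c + f k) x hx), ih (c + f k)⟩

lemma startsFrom_pairwise (f : Int → Int) (hf : ∀ k, 0 < f k) :
    ∀ (ks : List Int) (c : Int), (startsFrom f c ks).Pairwise (· ≤ ·) := by
  intro ks
  induction ks with
  | nil => intro c; simp [startsFrom]
  | cons k t ih =>
    intro c
    simp only [startsFrom, List.pairwise_cons]
    refine ⟨fun x hx => ?_, ih (c + f k)⟩
    have := mem_startsFrom_ge f hf t (c + f k) x hx
    have := hf k; omega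

lemma starts_concat (f : Int → Int) :
    ∀ (ks : List Int) (c : Int),
      c :: endsFrom f c ks = startsFrom f c ks ++ [cumEnd f c ks] := by
  intro ks
  induction ks with
  | nil => intro c; simp [endsFrom, startsFrom, cumEnd]
  | cons k t ih =>
    intro c
    simp only [endsFrom, startsFrom, cumEnd, List.cons_append, List.cons_inj_right]
    exact ih (c + f k)

-- If p holds on exactly the first n positions, countP p = n.
lemma countP_eq_of_boundary (p : Int → Bool) :
    ∀ (xs : List Int) (n : Nat), n ≤ xs.length →
      (∀ (j : Nat) (hj : j < xs.length), j < n → p xs[j]) →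
      (∀ (j : Nat) (hj : j < xs.length), n ≤ j → ¬ p xs[j]) →
      xs.countP p = n := by
  intro xs
  induction xs with
  | nil => intro n hn _ _; simp at hn; simp [hn]
  | cons x t ih =>
    intro n hn h1 h2
    cases n with
    | zero =>
      rw [List.countP_eq_zero]
      intro a ha
      rcases List.mem_iff_getElem.mp ha with ⟨j, hj, rfl⟩
      exact h2 j hj (Nat.zero_le j)
    | succ m =>
      have hx : p x := h1 0 (by simp) (Nat.succ_pos m)
      have ht : t.countP p = m := by
        apply ih m (by simpa using hn)
        · intro j hj hjm
          have := h1 (j + 1) (by simpa using Nat.succ_lt_succ hj) (Nat.succ_lt_succ hjm)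
          simpa using this
        · intro j hj hmj
          have := h2 (j + 1) (by simpa using Nat.succ_lt_succ hj) (Nat.succ_le_succ hmj)
          simpa using this
      simp [hx, ht]

lemma bisectLeft_eq_countP (xs : List Int) (x : Int)
    (hs : xs.Pairwise (· ≤ ·)) :
    PySem.List.bisectLeft xs x = xs.countP (fun y => decide (y < x)) := by
  obtain ⟨h0, h1, h2⟩ := PySem.List.bisectLeft_spec xs x hs
  exact (countP_eq_of_boundary _ xs _ h0
    (fun j hj hjn => by simpa using h1 j hj hjn)
    (fun j hj hnj => by simpa using not_lt.mpr (h2 j hj hnj))).symm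

lemma bisectRight_eq_countP (xs : List Int) (x : Int)
    (hs : xs.Pairwise (· ≤ ·)) :
    PySem.List.bisectRight xs x = xs.countP (fun y => decide (y ≤ x)) := by
  obtain ⟨h0, h1, h2⟩ := PySem.List.bisectRight_spec xs x hs
  exact (countP_eq_of_boundary _ xs _ h0
    (fun j hj hjn => by simpa using h1 j hj hjn)
    (fun j hj hnj => by simpa using not_le.mpr (h2 j hj hnj))).symm

-- The heart: A's selection equals the contiguous slice determined by the two counts.
lemma goA_eq_slice (start end_ : Int) (f : Int → Int) (hf : ∀ k, 0 < f k) :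
    ∀ (ks : List Int) (c : Int),
      goA start end_ f c ks =
        List.take ((startsFrom f c ks).countP (fun y => decide (y ≤ end_))
                    - (endsFrom f c ks).countP (fun y => decide (y < start)))
          (List.drop ((endsFrom f c ks).countP (fun y => decide (y < start))) ks) := by
  intro ks
  induction ks with
  | nil => intro c; simp [goA, endsFrom, startsFrom]
  | cons k t ih =>
    intro c
    have hfk := hf k
    simp only [goA, endsFrom, startsFrom, List.countP_cons]
    set a := (endsFrom f (c + f k) t).countP (fun y => decide (y < start)) with ha
    set b := (startsFrom f (c + f k) t).countP (fun y => decide (y ≤ end_)) with hb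
    by_cases hce : c ≤ end_
    · by_cases hcs : c + f k ≥ start
      · -- page selected: everything before it fails the < start test
        have ha0 : a = 0 := by
          rw [ha, List.countP_eq_zero]
          intro y hy
          have := mem_endsFrom_gt f hf t (c + f k) y hy
          simp; omega
        have hc1 : (decide (c + f k < start) : Bool) = false := by simp; omega
        have hc2 : (decide (c ≤ end_) : Bool) = true := by simp; omega
        rw [ih (c + f k)]
        simp [hcs, hce, hc1, ha0, ← ha, ← hb]
      · -- page before the range
        have hc1 : (decide (c + f k < start) : Bool) = true := by simp; omega
        have hc2 : (decide (c ≤ end_) : Bool) = true := by simp; omega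
        rw [ih (c + f k)]
        have : ¬ (c + f k ≥ start ∧ c ≤ end_) := by omega
        simp only [this, if_false, List.nil_append, hc1, hc2, if_true, ← ha, ← hb]
        have : b + 1 - (a + 1) = b - a := by omega
        simp [this]
    · -- past the range: nothing selected any more
      have hb0 : b = 0 := by
        rw [hb, List.countP_eq_zero]
        intro y hy
        have := mem_startsFrom_ge f hf t (c + f k) y hy
        simp; omega
      have hc2 : (decide (c ≤ end_) : Bool) = false := by simp; omega
      have : ¬ (c + f k ≥ start ∧ c ≤ end_) := by omega
      rw [ih (c + f k)]
      simp [this, hc2, hb0, ← ha, ← hb]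

-- A's foldl with a list accumulator is goA.
lemma foldlA_eq_goA (start end_ : Int) (f : Int → Int) :
    ∀ (ks : List Int) (acc : List Int) (c : Int),
      (ks.foldl (fun (st : List Int × Int) k =>
          ((if st.2 + f k ≥ start ∧ st.2 ≤ end_ then st.1 ++ [k] else st.1), st.2 + f k))
        (acc, c)).1 = acc ++ goA start end_ f c ks := by
  intro ks
  induction ks with
  | nil => intro acc c; simp [goA]
  | cons k t ih =>
    intro acc c
    simp only [List.foldl_cons, goA]
    rw [ih]
    by_cases h : c + f k ≥ start ∧ c ≤ end_ <;> simp [h]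

-- B's foldl builds exactly the list of cumulative end offsets.
lemma foldlB_eq_endsFrom (f : Int → Int) :
    ∀ (ks : List Int) (acc : List Int) (c : Int),
      ks.foldl (fun (acc : List Int × Int) k => (acc.1 ++ [acc.2 + f k], acc.2 + f k)) (acc, c)
        = (acc ++ endsFrom f c ks, cumEnd f c ks) := by
  intro ks
  induction ks with
  | nil => intro acc c; simp [endsFrom, cumEnd]
  | cons k t ih =>
    intro acc c
    simp only [List.foldl_cons, endsFrom, cumEnd]
    rw [ih]
    simp

-- ===== VERDICT (by name: the statement is the Claim_ definition above) =====
theorem find_pages_for_range_py_spec : Claim_equal_find_pages_for_range_py := by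
  intro start end_ page_texts _hdom
  unfold Spec_find_pages_for_range_py
  simp only [find_pages_for_range_py, find_pages_for_range_py_alt]
  set d := PySem.Dict.ofList page_texts with hd
  set f : Int → Int := fun k => PySem.Str.len (d.getD k "") + 20 with hfdef
  have hf : ∀ k, 0 < f k := by
    intro k
    have := PySem.Str.len_eq (d.getD k "")
    simp only [hfdef]
    omega
  set ks := PySem.List.sorted d.keys (fun k => k) false with hks
  -- normalise both loop bodies to use f
  have hA : (ks.foldl (fun (st : List Int × Int) page_num =>
        ((if st.2 + (PySem.Str.len (d.getD page_num "") + 20) ≥ start ∧ st.2 ≤ end_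
          then st.1 ++ [page_num] else st.1),
         st.2 + (PySem.Str.len (d.getD page_num "") + 20))) ([], 0)).1
      = goA start end_ f 0 ks := by
    rw [foldlA_eq_goA start end_ f ks [] 0]; simp
  have hB : ks.foldl (fun (acc : List Int × Int) k =>
        (acc.1 ++ [acc.2 + PySem.Str.len (d.getD k "") + 20],
         acc.2 + PySem.Str.len (d.getD k "") + 20)) ([], 0)
      = (endsFrom f 0 ks, cumEnd f 0 ks) := by
    have : (fun (acc : List Int × Int) k =>
        (acc.1 ++ [acc.2 + PySem.Str.len (d.getD k "") + 20],
         acc.2 + PySem.Str.len (d.getD k "") + 20))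
        = (fun (acc : List Int × Int) k => (acc.1 ++ [acc.2 + f k], acc.2 + f k)) := by
      funext acc k; simp [hfdef, add_assoc]
    rw [this, foldlB_eq_endsFrom f ks [] 0]; simp
  simp only [hA, hB]
  rw [goA_eq_slice start end_ f hf ks 0]
  -- the slice side
  cases ks with
  | nil =>
    simp [endsFrom, startsFrom, PySem.List.slice]
  | cons k t =>
    have hne : endsFrom f 0 (k :: t) ≠ [] := by simp [endsFrom]
    rw [PySem.List.slice_to_neg_one]
    have hstarts : (0 : Int) :: (endsFrom f 0 (k :: t)).dropLast
        = startsFrom f 0 (k :: t) := by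
      have h1 : ((0 : Int) :: endsFrom f 0 (k :: t)).dropLast
          = (0 : Int) :: (endsFrom f 0 (k :: t)).dropLast :=
        List.dropLast_cons_of_ne_nil hne
      rw [← h1, starts_concat f (k :: t) 0, List.dropLast_concat]
    rw [hstarts]
    rw [bisectLeft_eq_countP _ _ (endsFrom_pairwise f hf (k :: t) 0),
        bisectRight_eq_countP _ _ (startsFrom_pairwise f hf (k :: t) 0)]
    rw [PySem.List.slice_natCast]
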